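-- pv_equiv track=rewrite | github.com/ingridjackeline/tst-lp1 | tst/exercicios/exercicio46/soma_moldura_k.py | soma_moldura
-- ===== SOURCE A (Python) =====
-- def soma_moldura(m, k):
-- 	soma_elementos = 0
--
-- 	for i in range(len(m)):
-- 		for j in range(len(m[i])):
-- 			if (i == k or i == len(m) - 1 - k) and (j >= k and j <= len(m) - 1 - k):
-- 				soma_elementos += m[i][j]
-- 			elif (j == k or j == len(m) - 1 - k) and (i >= k and i <= len(m) - 1 - k):
-- 				soma_elementos += m[i][j]
--
-- 	return soma_elementos
-- ===== SOURCE B (Python) =====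
-- def soma_moldura(m, k):
-- 	# Visit only the frame rows/columns of level k directly instead of scanning every cell.
-- 	n = len(m)
-- 	hi = n - 1 - k
-- 	total = 0
-- 	for i, row in enumerate(m):
-- 		L = len(row)
-- 		if i == k or i == hi:
-- 			total += sum(row[max(k, 0):min(hi, L - 1) + 1])
-- 		elif k <= i <= hi:
-- 			if 0 <= k < L:
-- 				total += row[k]
-- 			if 0 <= hi < L and hi != k:
-- 				total += row[hi]
-- 	return total
-- ===== Notes on version B (the rewrite author's own statement) =====
-- stated objective: faster
-- what changed: B visits only the frame itself: one pass over the rows that slices the two frame rows and touches just the two frame columns of the rows in between, instead of A's nested scan of every cell with a per-cell membership test.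
import Mathlib
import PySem

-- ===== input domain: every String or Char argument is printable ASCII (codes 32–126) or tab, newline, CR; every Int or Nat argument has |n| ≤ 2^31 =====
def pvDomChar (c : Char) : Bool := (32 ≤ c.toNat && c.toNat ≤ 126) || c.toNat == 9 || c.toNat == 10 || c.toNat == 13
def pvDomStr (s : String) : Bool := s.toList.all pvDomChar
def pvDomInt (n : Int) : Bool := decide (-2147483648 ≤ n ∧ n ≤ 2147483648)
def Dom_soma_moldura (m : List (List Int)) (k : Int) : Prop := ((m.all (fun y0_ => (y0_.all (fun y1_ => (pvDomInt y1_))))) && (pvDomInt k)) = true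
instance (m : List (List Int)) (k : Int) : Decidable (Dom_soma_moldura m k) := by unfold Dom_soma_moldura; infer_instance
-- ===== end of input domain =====

-- B sums the frame of level k directly (two row slices plus two cells per middle row)
-- instead of A's scan of every cell; return-value equivalence is proved for all inputs.


-- ===== PORT A =====
def soma_moldura (m : List (List Int)) (k : Int) : Int :=
  (PySem.List.pyRange 0 (m.length : Int) 1).foldl (fun soma i =>
    let row := PySem.List.pyGetD m i []
    (PySem.List.pyRange 0 (row.length : Int) 1).foldl (fun s j =>
      if (i = k ∨ i = (m.length : Int) - 1 - k) ∧ (k ≤ j ∧ j ≤ (m.length : Int) - 1 - k) then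
        s + PySem.List.pyGetD row j 0
      else if (j = k ∨ j = (m.length : Int) - 1 - k) ∧ (k ≤ i ∧ i ≤ (m.length : Int) - 1 - k) then
        s + PySem.List.pyGetD row j 0
      else s) soma) 0

-- ===== PORT B =====
def soma_moldura_alt (m : List (List Int)) (k : Int) : Int :=
  let n : Int := m.length
  let hi : Int := n - 1 - k
  (PySem.List.enumerate m).foldl (fun total p =>
    let i := p.1
    let row := p.2
    let L : Int := row.length
    if i = k ∨ i = hi then
      total + (PySem.List.slice row (some (max k 0)) (some (min hi (L - 1) + 1))).sum
    else if k ≤ i ∧ i ≤ hi then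
      let t1 := if 0 ≤ k ∧ k < L then total + PySem.List.pyGetD row k 0 else total
      if (0 ≤ hi ∧ hi < L) ∧ hi ≠ k then t1 + PySem.List.pyGetD row hi 0 else t1
    else total) 0

-- ===== PRECONDITION & SPEC =====
def Spec_soma_moldura (m : List (List Int)) (k : Int) (out : Int) : Prop := out = soma_moldura_alt m k
instance (m : List (List Int)) (k : Int) (out : Int) : Decidable (Spec_soma_moldura m k out) := by unfold Spec_soma_moldura; infer_instance

-- ===== CLAIM (what is proved, stated in full; the proofs are below) =====
def Claim_equal_soma_moldura : Prop := ∀ (m : List (List Int)) (k : Int), Dom_soma_moldura m k → Spec_soma_moldura m k (soma_moldura m k)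

-- ===== LEMMAS AND PROOFS =====

-- sum of the elements of `row` whose index (starting at j0) satisfies P
def sumIf (P : Int → Prop) [DecidablePred P] : List Int → Int → Int
  | [], _ => 0
  | x :: xs, j0 => (if P j0 then x else 0) + sumIf P xs (j0 + 1)

theorem sumIf_congr (P Q : Int → Prop) [DecidablePred P] [DecidablePred Q] :
    ∀ (row : List Int) (j0 : Int),
      (∀ j, j0 ≤ j → j < j0 + row.length → (P j ↔ Q j)) →
      sumIf P row j0 = sumIf Q row j0 := by
  intro row
  induction row with
  | nil => intro j0 _; rfl
  | cons x xs ih =>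
    intro j0 h
    simp only [sumIf, List.length_cons] at *
    rw [if_congr (h j0 (le_refl _) (by push_cast; omega)) rfl rfl,
        ih (j0 + 1) (fun j h1 h2 => h j (by omega) (by push_cast at h2 ⊢; omega))]

theorem sumIf_append (P : Int → Prop) [DecidablePred P] :
    ∀ (xs ys : List Int) (j0 : Int),
      sumIf P (xs ++ ys) j0 = sumIf P xs j0 + sumIf P ys (j0 + xs.length) := by
  intro xs
  induction xs with
  | nil => intro ys j0; simp [sumIf]
  | cons x xs ih =>
    intro ys j0
    simp only [List.cons_append, sumIf, List.length_cons, ih]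
    push_cast
    ring

theorem sumIf_all_false (P : Int → Prop) [DecidablePred P] :
    ∀ (row : List Int) (j0 : Int),
      (∀ j, j0 ≤ j → j < j0 + row.length → ¬ P j) →
      sumIf P row j0 = 0 := by
  intro row
  induction row with
  | nil => intro j0 _; rfl
  | cons x xs ih =>
    intro j0 h
    simp only [sumIf, List.length_cons] at *
    rw [if_neg (h j0 (le_refl _) (by push_cast; omega)),
        ih (j0 + 1) (fun j h1 h2 => h j (by omega) (by push_cast at h2 ⊢; omega))]
    simp

theorem sumIf_all_true (P : Int → Prop) [DecidablePred P] :
    ∀ (row : List Int) (j0 : Int),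
      (∀ j, j0 ≤ j → j < j0 + row.length → P j) →
      sumIf P row j0 = row.sum := by
  intro row
  induction row with
  | nil => intro j0 _; rfl
  | cons x xs ih =>
    intro j0 h
    simp only [sumIf, List.length_cons, List.sum_cons] at *
    rw [if_pos (h j0 (le_refl _) (by push_cast; omega)),
        ih (j0 + 1) (fun j h1 h2 => h j (by omega) (by push_cast at h2 ⊢; omega))]

theorem sumIf_single (t : Int) :
    ∀ (row : List Int) (j0 : Int),
      sumIf (fun j => j = t) row j0 =
        if j0 ≤ t ∧ t < j0 + row.length then row.getD (t - j0).toNat 0 else 0 := by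
  intro row
  induction row with
  | nil => intro j0; simp [sumIf]
  | cons x xs ih =>
    intro j0
    simp only [sumIf, List.length_cons, ih]
    by_cases hj : j0 = t
    · subst hj
      rw [if_pos rfl, if_neg (by omega), if_pos (by push_cast; omega)]
      simp
    · rw [if_neg hj]
      by_cases hr : j0 + 1 ≤ t ∧ t < j0 + 1 + xs.length
      · rw [if_pos hr, if_pos (by push_cast at hr ⊢; omega)]
        have ht : (t - j0).toNat = (t - (j0 + 1)).toNat + 1 := by omega
        simp [ht]
      · rw [if_neg hr, if_neg (by push_cast at hr ⊢; omega)]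
        simp

theorem sumIf_or_disjoint (P Q : Int → Prop) [DecidablePred P] [DecidablePred Q]
    (hd : ∀ j, ¬ (P j ∧ Q j)) :
    ∀ (row : List Int) (j0 : Int),
      sumIf (fun j => P j ∨ Q j) row j0 = sumIf P row j0 + sumIf Q row j0 := by
  intro row
  induction row with
  | nil => intro j0; rfl
  | cons x xs ih =>
    intro j0
    simp only [sumIf, ih]
    have := hd j0
    by_cases hp : P j0 <;> by_cases hq : Q j0
    · exact absurd ⟨hp, hq⟩ this
    all_goals simp [hp, hq] <;> ring

-- index loop 'for i in range(a, len(m)): … i … m[i] …' as a fold over enumerate of the suffix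
theorem foldl_idx_eq_enumerate {α β : Type} (g : β → Int → α → β) (d : α) (m : List α) :
    ∀ (xs : List α) (a : Nat), m.drop a = xs → ∀ (init : β),
      (PySem.List.pyRange (a : Int) (m.length : Int) 1).foldl
          (fun s i => g s i (PySem.List.pyGetD m i d)) init
        = (PySem.List.enumerate xs (a : Int)).foldl (fun s p => g s p.1 p.2) init := by
  intro xs
  induction xs with
  | nil =>
    intro a ha init
    rw [PySem.List.pyRange_one_eq_nil (by
      have := List.drop_eq_nil_iff.mp ha; exact_mod_cast this)]
    simp [PySem.List.enumerate]
  | cons x xs ih =>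
    intro a ha init
    have halt : a < m.length := by
      by_contra h
      rw [List.drop_eq_nil_of_le (by omega)] at ha
      simp at ha
    have hx : m.getD a d = x := by
      have h0 := congrArg (·[0]?) ha
      simp only [List.getElem?_drop, Nat.add_zero] at h0
      simp [List.getD, h0]
    rw [PySem.List.pyRange_one_cons (by exact_mod_cast halt), PySem.List.enumerate_cons]
    simp only [List.foldl_cons]
    rw [PySem.List.pyGetD_natCast, hx]
    have := ih (a + 1)
      (by simpa [List.drop_drop, Nat.add_comm] using congrArg (List.drop 1) ha)
      (g init (a : Int) x)
    push_cast at this ⊢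
    exact this

-- A's inner loop over a row, as acc + sumIf of the disjunction of its two branch conditions
theorem foldl_if2 (P Q : Int → Prop) [DecidablePred P] [DecidablePred Q] :
    ∀ (row : List Int) (j0 acc : Int),
      (PySem.List.enumerate row j0).foldl
          (fun s p => if P p.1 then s + p.2 else if Q p.1 then s + p.2 else s) acc
        = acc + sumIf (fun j => P j ∨ Q j) row j0 := by
  intro row
  induction row with
  | nil => intro j0 acc; simp [PySem.List.enumerate, sumIf]
  | cons x xs ih =>
    intro j0 acc
    rw [PySem.List.enumerate_cons]
    simp only [List.foldl_cons, sumIf, ih]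
    by_cases hp : P j0 <;> by_cases hq : Q j0 <;> simp [hp, hq] <;> ring

theorem row_contrib (n k i : Int) (h0 : 0 ≤ i) (hn : i < n) (row : List Int) :
    sumIf (fun j => ((i = k ∨ i = n - 1 - k) ∧ (k ≤ j ∧ j ≤ n - 1 - k)) ∨
                    ((j = k ∨ j = n - 1 - k) ∧ (k ≤ i ∧ i ≤ n - 1 - k))) row 0
    =
    (if i = k ∨ i = n - 1 - k then
       (PySem.List.slice row (some (max k 0)) (some (min (n - 1 - k) ((row.length : Int) - 1) + 1))).sum
     else if k ≤ i ∧ i ≤ n - 1 - k then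
       (if 0 ≤ k ∧ k < (row.length : Int) then row.getD k.toNat 0 else 0) +
       (if 0 ≤ n - 1 - k ∧ n - 1 - k < (row.length : Int) then row.getD (n - 1 - k).toNat 0 else 0)
     else 0) := by
  by_cases h1 : i = k ∨ i = n - 1 - k
  · rw [if_pos h1]
    have hhi : 0 ≤ n - 1 - k := by omega
    rw [sumIf_congr _ (fun j => k ≤ j ∧ j ≤ n - 1 - k) row 0
      (fun j hj1 hj2 => by omega)]
    rw [PySem.List.slice_toNat row (by omega) (by omega)]
    set lo := (max k 0).toNat with hlo
    set c := (min (n - 1 - k) ((row.length : Int) - 1) + 1).toNat - lo with hc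
    have hrow : row = row.take lo ++ ((row.drop lo).take c ++ (row.drop lo).drop c) := by
      rw [List.take_append_drop, List.take_append_drop]
    conv_lhs => rw [hrow]
    rw [sumIf_append, sumIf_append]
    rw [sumIf_all_false _ _ _ (by
      intro j hj1 hj2
      simp only [List.length_take] at hj2
      omega)]
    rw [sumIf_all_true _ _ _ (by
      intro j hj1 hj2
      simp only [List.length_take, List.length_drop] at hj1 hj2 ⊢
      push_cast at hj1 hj2 ⊢
      omega)]
    rw [sumIf_all_false _ _ _ (by
      intro j hj1 hj2
      simp only [List.length_take, List.length_drop] at hj1 hj2 ⊢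
      push_cast at hj1 hj2 ⊢
      omega)]
    ring
  · rw [if_neg h1]
    by_cases h2 : k ≤ i ∧ i ≤ n - 1 - k
    · rw [if_pos h2]
      have hne : k ≠ n - 1 - k := by omega
      rw [sumIf_congr _ (fun j => j = k ∨ j = n - 1 - k) row 0
        (fun j hj1 hj2 => by constructor <;> (intro h; omega))]
      rw [sumIf_or_disjoint (fun j => j = k) (fun j => j = n - 1 - k) (by intro j; omega)]
      rw [sumIf_single, sumIf_single]
      simp only [zero_add, Int.sub_zero]
    · rw [if_neg h2]
      exact sumIf_all_false _ _ _ (by intro j hj1 hj2; omega)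

theorem soma_moldura_eq_alt : ∀ (m : List (List Int)) (k : Int), soma_moldura m k = soma_moldura_alt m k := by
  intro m k
  unfold soma_moldura soma_moldura_alt
  have hA := foldl_idx_eq_enumerate
    (fun soma i row =>
      (PySem.List.pyRange 0 (row.length : Int) 1).foldl (fun s j =>
        if (i = k ∨ i = (m.length : Int) - 1 - k) ∧ (k ≤ j ∧ j ≤ (m.length : Int) - 1 - k) then
          s + PySem.List.pyGetD row j 0
        else if (j = k ∨ j = (m.length : Int) - 1 - k) ∧ (k ≤ i ∧ i ≤ (m.length : Int) - 1 - k) then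
          s + PySem.List.pyGetD row j 0
        else s) soma)
    ([] : List Int) m m 0 rfl 0
  simp only [Nat.cast_zero] at hA
  rw [hA]
  apply PySem.List.foldl_congr_mem
  intro total p hp
  have hib : 0 ≤ p.1 ∧ p.1 < (m.length : Int) := by
    have : p.1 ∈ PySem.List.pyRange 0 (0 + (m.length : Int)) 1 := by
      rw [← PySem.List.map_fst_enumerate m 0]
      exact List.mem_map_of_mem hp
    rw [PySem.List.mem_pyRange_one] at this
    omega
  obtain ⟨i, row⟩ := p
  simp only at hib ⊢
  -- inner loop: pyRange over row → enumerate over row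
  have hI := foldl_idx_eq_enumerate
    (fun s j x =>
      if (i = k ∨ i = (m.length : Int) - 1 - k) ∧ (k ≤ j ∧ j ≤ (m.length : Int) - 1 - k) then
        s + x
      else if (j = k ∨ j = (m.length : Int) - 1 - k) ∧ (k ≤ i ∧ i ≤ (m.length : Int) - 1 - k) then
        s + x
      else s)
    (0 : Int) row row 0 rfl total
  simp only [Nat.cast_zero] at hI
  rw [hI]
  rw [foldl_if2
    (fun j => (i = k ∨ i = (m.length : Int) - 1 - k) ∧ (k ≤ j ∧ j ≤ (m.length : Int) - 1 - k))
    (fun j => (j = k ∨ j = (m.length : Int) - 1 - k) ∧ (k ≤ i ∧ i ≤ (m.length : Int) - 1 - k))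
    row 0 total]
  rw [row_contrib (m.length : Int) k i hib.1 hib.2 row]
  by_cases h1 : i = k ∨ i = (m.length : Int) - 1 - k
  · rw [if_pos h1, if_pos h1]
  · rw [if_neg h1, if_neg h1]
    by_cases h2 : k ≤ i ∧ i ≤ (m.length : Int) - 1 - k
    · rw [if_pos h2, if_pos h2]
      have hne : (m.length : Int) - 1 - k ≠ k := by omega
      by_cases cA : 0 ≤ k ∧ k < (row.length : Int) <;>
        by_cases cB : 0 ≤ (m.length : Int) - 1 - k ∧ (m.length : Int) - 1 - k < (row.length : Int)
      · rw [if_pos cA, if_pos cB, if_pos cA, if_pos ⟨cB, hne⟩,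
          PySem.List.pyGetD_of_nonneg row 0 cA.1, PySem.List.pyGetD_of_nonneg row 0 cB.1]
        ring
      · rw [if_pos cA, if_neg cB, if_pos cA, if_neg (fun h => cB h.1),
          PySem.List.pyGetD_of_nonneg row 0 cA.1]
        ring
      · rw [if_neg cA, if_pos cB, if_neg cA, if_pos ⟨cB, hne⟩,
          PySem.List.pyGetD_of_nonneg row 0 cB.1]
        ring
      · rw [if_neg cA, if_neg cB, if_neg cA, if_neg (fun h => cB h.1)]
        ring
    · rw [if_neg h2, if_neg h2]; ring

-- ===== VERDICT (by name: the statement is the Claim_ definition above) =====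
theorem soma_moldura_spec : Claim_equal_soma_moldura := by
  intro m k _
  unfold Spec_soma_moldura
  exact soma_moldura_eq_alt m k
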